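-- pv_equiv track=rewrite | github.com/dreddak47/Assessing-Cognitive-Features-During-Test | frontend/src/k.py | findDominance
-- ===== SOURCE A (Python) =====
-- def findDominance(s):
--     m=len(s[0])
--     result = []
--
--     for length in range(1, m + 1):
--         prefix_counts = {}
--         max_dominance = 0
--
--         # Count occurrences of each prefix of the current length
--         for string in s:
--             if length <= len(string):
--                 prefix = string[:length]
--                 if prefix in prefix_counts:
--                     prefix_counts[prefix] += 1
--                 else:
--                     prefix_counts[prefix] = 1
--                 # Update max dominance for the current length
--                 max_dominance = max(max_dominance, prefix_counts[prefix])
--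
--         # Store the maximum dominance for this prefix length
--         result.append(max_dominance)
--
--     return result
-- ===== SOURCE B (Python) =====
-- def findDominance(s):
--     m = len(s[0])
--     result = []
--     for L in range(1, m + 1):
--         # all prefixes of length L
--         ps = [t[:L] for t in s if len(t) >= L]
--         # max multiplicity by repeated partitioning around the first element
--         best = 0
--         while ps:
--             p = ps[0]
--             same = 0
--             rest = []
--             for q in ps:
--                 if q == p:
--                     same += 1
--                 else:
--                     rest.append(q)
--             if same > best:
--                 best = same
--             ps = rest
--         result.append(best)
--     return result
-- ===== Notes on version B (the rewrite author's own statement) =====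
-- stated objective: alternative
-- what changed: B replaces A's per-length hash-map counting with running max by a comprehension extracting the length-L prefixes and a partition-refinement max-multiplicity search: repeatedly count the first remaining prefix and drop all its copies, keeping the best count -- no dict, no running max.
import Mathlib
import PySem

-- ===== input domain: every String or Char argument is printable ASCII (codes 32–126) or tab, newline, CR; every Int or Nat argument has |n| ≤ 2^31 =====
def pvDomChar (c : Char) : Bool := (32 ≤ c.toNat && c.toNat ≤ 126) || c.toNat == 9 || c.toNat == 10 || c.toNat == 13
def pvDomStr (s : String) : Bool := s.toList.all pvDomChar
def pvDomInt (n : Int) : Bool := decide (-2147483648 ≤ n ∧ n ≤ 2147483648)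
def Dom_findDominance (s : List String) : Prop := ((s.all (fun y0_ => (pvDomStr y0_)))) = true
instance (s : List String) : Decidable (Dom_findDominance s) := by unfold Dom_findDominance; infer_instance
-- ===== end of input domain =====

-- B replaces A's per-length hash-map counting (running max in a dict) by extracting the
-- length-L prefixes and finding the max multiplicity by partition refinement:
-- repeatedly count the first remaining prefix and drop all its copies.

-- ===== PORT A =====
-- per-string step of A's inner loop at prefix length L: state = (prefix_counts, max_dominance)
def findDominance_stepA (L : Int) (st : PySem.Dict String Int × Int) (t : String) :
    PySem.Dict String Int × Int :=
  if L ≤ PySem.Str.len t then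
    let pfx := PySem.Str.slice t none (some L)
    let d := if st.1.contains pfx
             then st.1.insert pfx (st.1.getD pfx 0 + 1)
             else st.1.insert pfx 1
    (d, max st.2 (d.getD pfx 0))
  else st

def findDominance (s : List String) : List Int :=
  let m := PySem.Str.len (PySem.List.pyGetD s 0 "")
  (PySem.List.pyRange 1 (m + 1) 1).foldl
    (fun result L =>
      result ++ [(s.foldl (findDominance_stepA L) (PySem.Dict.empty, 0)).2])
    []

-- ===== PORT B =====
-- inner 'for q in ps' pass of B: state = (same, rest)
def pvScan (p : String) (ac : Int × List String) (q : String) : Int × List String :=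
  if q == p then (ac.1 + 1, ac.2) else (ac.1, ac.2 ++ [q])

-- characterization of the pass; the port's recursion cites it for termination
theorem pvScan_foldl (p : String) (ps : List String) :
    ∀ (a : Int) (r : List String),
      ps.foldl (pvScan p) (a, r)
        = (a + (ps.count p : Int), r ++ ps.filter (fun q => !(q == p))) := by
  induction ps with
  | nil => intro a r; simp
  | cons q tl ih =>
    intro a r
    simp only [List.foldl_cons, pvScan]
    by_cases h : q == p
    · rw [if_pos h, ih]
      have : q = p := by simpa using h
      subst this
      simp
      ring
    · rw [if_neg h, ih]
      have hqp : ¬ q = p := by simpa using h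
      simp [hqp, h]

-- B's 'while ps:' loop with the running best
def pvMaxcntLoop : List String → Int → Int
  | [], best => best
  | p :: tl, best =>
    let pr := (p :: tl).foldl (pvScan p) (0, [])
    pvMaxcntLoop pr.2 (if best < pr.1 then pr.1 else best)
termination_by ps _ => ps.length
decreasing_by
  rw [pvScan_foldl]
  simp only [List.nil_append, List.filter_cons, beq_self_eq_true, Bool.not_true]
  exact Nat.lt_succ_of_le (List.length_filter_le _ tl)

def findDominance_alt (s : List String) : List Int :=
  let m := PySem.Str.len (PySem.List.pyGetD s 0 "")
  (PySem.List.pyRange 1 (m + 1) 1).foldl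
    (fun result L =>
      let ps := (s.filter (fun t => decide (L ≤ PySem.Str.len t))).map
        (fun t => PySem.Str.slice t none (some L))
      result ++ [pvMaxcntLoop ps 0])
    []

-- ===== PRECONDITION & SPEC =====
-- Pre_ excludes only the empty list, on which A raises IndexError at s[0].
def Pre_findDominance (s : List String) : Prop := s ≠ []
instance (s : List String) : Decidable (Pre_findDominance s) := by unfold Pre_findDominance; infer_instance
def pvWitness_findDominance : List String := ["ab", "ac", "a"]

def Spec_findDominance (s : List String) (out : List Int) : Prop := out = findDominance_alt s
instance (s : List String) (out : List Int) : Decidable (Spec_findDominance s out) := by unfold Spec_findDominance; infer_instance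

-- ===== CLAIM (what is proved, stated in full; the proofs are below) =====
def Claim_equal_findDominance : Prop := ∀ (s : List String), Dom_findDominance s → Pre_findDominance s → Spec_findDominance s (findDominance s)

-- ===== LEMMAS AND PROOFS =====

-- prefix of t of length L, as both ports compute it
def pvPfx (t : String) (L : Int) : String := PySem.Str.slice t none (some L)

-- the per-length prefix list both analyses reduce to
def pvPs (s : List String) (L : Int) : List String :=
  (s.filter (fun t => decide (L ≤ PySem.Str.len t))).map (fun t => pvPfx t L)

-- the canonical per-length counting step inside A's loop
def pvCntStep (L : Int) (d : PySem.Dict String Int) (t : String) : PySem.Dict String Int :=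
  if L ≤ PySem.Str.len t then d.insert (pvPfx t L) (d.getD (pvPfx t L) 0 + 1) else d

-- running max with initial value 0
def pvM (l : List Int) : Int := l.foldl max 0

theorem pvM_le (l : List Int) (c : Int) (i : Int) (hi : i ≤ c) (h : ∀ x ∈ l, x ≤ c) :
    l.foldl max i ≤ c := by
  induction l generalizing i with
  | nil => exact hi
  | cons a l ih =>
    exact ih (max i a) (max_le hi (h a (by simp))) (fun x hx => h x (by simp [hx]))

theorem pvM_nonneg (l : List Int) : 0 ≤ pvM l := (PySem.List.le_foldl_max l 0).1

theorem pvM_mem_le (l : List Int) (x : Int) (hx : x ∈ l) : x ≤ pvM l :=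
  (PySem.List.le_foldl_max l 0).2 x hx

theorem pv_mem_values {d : PySem.Dict String Int} {x : Int} :
    x ∈ d.values ↔ ∃ q ∈ d.items, q.2 = x := by
  simp [PySem.Dict.values, List.mem_map]

-- inserting a value strictly larger than every value stored at that key
-- turns the max of the values into max(old max, new value)
theorem pvM_values_insert (d : PySem.Dict String Int) (p : String) (v : Int)
    (hlt : ∀ q ∈ d.items, q.1 = p → q.2 < v) :
    pvM ((d.insert p v).values) = max (pvM d.values) v := by
  apply le_antisymm
  · apply pvM_le
    · exact le_trans (pvM_nonneg d.values) (le_max_left _ _)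
    · intro x hx
      rcases pv_mem_values.mp hx with ⟨q, hq, hqx⟩
      rcases (PySem.Dict.mem_items_insert d p v q).mp hq with h | ⟨hmem, _⟩
      · subst hqx; rw [h]; exact le_max_right _ _
      · exact le_trans (pvM_mem_le _ _ (pv_mem_values.mpr ⟨q, hmem, hqx⟩)) (le_max_left _ _)
  · have hv : v ≤ pvM ((d.insert p v).values) :=
      pvM_mem_le _ _ (pv_mem_values.mpr ⟨(p, v), PySem.Dict.mem_items_insert_self d p v, rfl⟩)
    apply max_le _ hv
    apply pvM_le _ _ _ (pvM_nonneg _)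
    intro x hx
    rcases pv_mem_values.mp hx with ⟨q, hq, hqx⟩
    by_cases hk : q.1 = p
    · exact le_trans (le_of_lt (hqx ▸ hlt q hq hk)) hv
    · exact pvM_mem_le _ _ (pv_mem_values.mpr
        ⟨q, (PySem.Dict.mem_items_insert d p v q).mpr (Or.inr ⟨hq, hk⟩), hqx⟩)

-- one step of A's inner loop, on a state satisfying the invariant
theorem pv_stepA_eq (L : Int) (d : PySem.Dict String Int) (t : String)
    (hnd : d.keys.Nodup) :
    findDominance_stepA L (d, pvM d.values) t
      = (pvCntStep L d t, pvM ((pvCntStep L d t).values)) := by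
  simp only [findDominance_stepA, pvCntStep, pvPfx]
  by_cases hlen : L ≤ PySem.Str.len t
  · rw [if_pos hlen, if_pos hlen]
    have hd : (if d.contains (PySem.Str.slice t none (some L)) = true
               then d.insert (PySem.Str.slice t none (some L))
                      (d.getD (PySem.Str.slice t none (some L)) 0 + 1)
               else d.insert (PySem.Str.slice t none (some L)) 1)
             = d.insert (PySem.Str.slice t none (some L))
                 (d.getD (PySem.Str.slice t none (some L)) 0 + 1) := by
      by_cases hc : d.contains (PySem.Str.slice t none (some L))
      · rw [if_pos hc]
      · have hc' : d.contains (PySem.Str.slice t none (some L)) = false := by simpa using hc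
        rw [if_neg (by simp [hc']), PySem.Dict.getD_of_not_contains d 0 hc']
        norm_num
    rw [hd, PySem.Dict.getD_insert_self]
    have hmax := pvM_values_insert d (PySem.Str.slice t none (some L))
      (d.getD (PySem.Str.slice t none (some L)) 0 + 1)
      (fun q hq hqp => by
        obtain ⟨q1, q2⟩ := q
        simp only at hqp
        subst hqp
        have := PySem.Dict.getD_of_mem_items d hq hnd 0
        omega)
    rw [← hmax]
  · rw [if_neg hlen, if_neg hlen]

theorem pv_cntStep_nodup (L : Int) (d : PySem.Dict String Int) (t : String)
    (hnd : d.keys.Nodup) : (pvCntStep L d t).keys.Nodup := by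
  unfold pvCntStep
  split
  · exact PySem.Dict.nodup_keys_insert _ _ _ hnd
  · exact hnd

-- A's inner loop computes the counting fold together with the max of its values
theorem pv_A_loop (L : Int) (xs : List String) :
    ∀ (d : PySem.Dict String Int), d.keys.Nodup →
      xs.foldl (findDominance_stepA L) (d, pvM d.values)
        = (xs.foldl (pvCntStep L) d, pvM ((xs.foldl (pvCntStep L) d).values)) := by
  induction xs with
  | nil => intro d _; rfl
  | cons t xs ih =>
    intro d hnd
    simp only [List.foldl_cons]
    rw [pv_stepA_eq L d t hnd]
    exact ih (pvCntStep L d t) (pv_cntStep_nodup L d t hnd)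

theorem pv_empty_values : (PySem.Dict.empty : PySem.Dict String Int).values = [] := rfl

-- A's result, in closed map form
theorem pv_A_eq (s : List String) :
    findDominance s
      = (PySem.List.pyRange 1 (PySem.Str.len (PySem.List.pyGetD s 0 "") + 1) 1).map
          (fun L => pvM ((s.foldl (pvCntStep L) PySem.Dict.empty).values)) := by
  unfold findDominance
  rw [PySem.List.foldl_append_singleton_eq_map
    (fun L => (s.foldl (findDominance_stepA L) (PySem.Dict.empty, 0)).2)]
  simp only [List.nil_append]
  apply List.map_congr_left
  intro L _
  have h0 : (0 : Int) = pvM (PySem.Dict.empty : PySem.Dict String Int).values := by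
    rw [pv_empty_values]; rfl
  rw [h0, pv_A_loop L s PySem.Dict.empty PySem.Dict.nodup_keys_empty]

-- A's counting fold is exactly Counter(ps) of the per-length prefix list
theorem pv_cnt_fold (L : Int) (s : List String) :
    ∀ (d : PySem.Dict String Int),
      s.foldl (pvCntStep L) d
        = (pvPs s L).foldl (fun d x => d.insert x (d.getD x 0 + 1)) d := by
  induction s with
  | nil => intro d; rfl
  | cons t s ih =>
    intro d
    simp only [List.foldl_cons, pvPs, List.filter_cons]
    by_cases hc : L ≤ PySem.Str.len t
    · rw [if_pos (by simpa using hc)]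
      simp only [List.map_cons, List.foldl_cons]
      rw [show pvCntStep L d t = d.insert (pvPfx t L) (d.getD (pvPfx t L) 0 + 1) from
        if_pos hc]
      exact ih _
    · rw [if_neg (by simpa using hc)]
      rw [show pvCntStep L d t = d from if_neg hc]
      exact ih _

theorem pv_cnt_eq_counter (L : Int) (s : List String) :
    s.foldl (pvCntStep L) PySem.Dict.empty = PySem.Dict.counter (pvPs s L) := by
  rw [pv_cnt_fold L s PySem.Dict.empty,
    PySem.Dict.foldl_insert_getD_add_one_eq_counter]

-- the values of Counter(ps) are the counts of the distinct elements
theorem pv_values_counter (ps : List String) :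
    (PySem.Dict.counter ps).values
      = (PySem.Set.ofList ps).map (fun k => (ps.count k : Int)) := by
  have : (PySem.Dict.counter ps).values = (PySem.Dict.counter ps).items.map (·.2) := rfl
  rw [this, PySem.Dict.items_counter, List.map_map]
  rfl

-- dedup commutes with filter
theorem pv_ofList_filter (q : String → Bool) (xs : List String) :
    PySem.Set.ofList (xs.filter q) = (PySem.Set.ofList xs).filter q := by
  induction xs with
  | nil => rfl
  | cons x xs ih =>
    rw [PySem.Set.ofList_cons, List.filter_cons]
    by_cases hq : q x
    · rw [if_pos hq, PySem.Set.ofList_cons, ih]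
      simp only [PySem.Set.discard, List.filter_filter, List.filter_cons, hq, if_pos]
      congr 1
      apply List.filter_congr
      intro y _
      exact Bool.and_comm _ _
    · have hq' : q x = false := by simpa using hq
      rw [if_neg (by simp [hq']), ih]
      simp only [PySem.Set.discard, List.filter_cons, hq', List.filter_filter]
      apply List.filter_congr
      intro y _
      by_cases hqy : q y
      · have : ¬ (y = x) := fun h => by rw [h, hq'] at hqy; exact Bool.false_ne_true hqy
        simp [hqy, this]
      · simp [show q y = false by simpa using hqy]

-- B's while loop computes the running max of the distinct elements' counts
theorem pv_loop_eq (n : Nat) :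
    ∀ (ps : List String), ps.length ≤ n → ∀ (best : Int),
      pvMaxcntLoop ps best
        = ((PySem.Set.ofList ps).map (fun k => (ps.count k : Int))).foldl max best := by
  induction n with
  | zero =>
    intro ps hps best
    rw [List.length_eq_zero_iff.mp (Nat.le_zero.mp hps)]
    simp [pvMaxcntLoop, PySem.Set.ofList_nil]
  | succ n ih =>
    intro ps hps best
    match ps with
    | [] => simp [pvMaxcntLoop, PySem.Set.ofList_nil]
    | p :: tl =>
      rw [pvMaxcntLoop, pvScan_foldl]
      simp only [List.nil_append, zero_add]
      have hrest : (p :: tl).filter (fun q => !(q == p)) = tl.filter (fun q => !(q == p)) := by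
        simp
      rw [hrest]
      have hlen : (tl.filter (fun q => !(q == p))).length ≤ n :=
        le_trans (List.length_filter_le _ tl) (Nat.succ_le_succ_iff.mp hps)
      rw [ih _ hlen]
      -- right-hand side: peel the head of the dedup list
      rw [PySem.Set.ofList_cons]
      simp only [List.map_cons, List.foldl_cons]
      have hhead : (if best < ((p :: tl).count p : Int) then ((p :: tl).count p : Int) else best)
          = max best ((p :: tl).count p : Int) := by
        rw [max_def]
        split_ifs with h1 h2 h2 <;> omega
      rw [hhead]
      congr 1
      have hdiscard : (PySem.Set.ofList tl).discard p
          = PySem.Set.ofList (tl.filter (fun q => !(q == p))) := by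
        rw [pv_ofList_filter]; rfl
      rw [hdiscard]
      apply List.map_congr_left
      intro k hk
      have hkmem : k ∈ tl.filter (fun q => !(q == p)) := (PySem.Set.mem_ofList _ _).mp hk
      have hknp : ¬ (k = p) := by
        rcases List.mem_filter.mp hkmem with ⟨_, hq⟩
        intro h; subst h; simp at hq
      have h1 : (p :: tl).count k = tl.count k := by
        have hpk : ¬ p = k := fun h => hknp h.symm
        simp [hpk]
      have h2 : (tl.filter (fun q => !(q == p))).count k = tl.count k :=
        List.count_filter (by simp [hknp])
      rw [h1, h2]

-- B's result, in closed map form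
theorem pv_B_eq (s : List String) :
    findDominance_alt s
      = (PySem.List.pyRange 1 (PySem.Str.len (PySem.List.pyGetD s 0 "") + 1) 1).map
          (fun L => pvMaxcntLoop (pvPs s L) 0) := by
  have h := PySem.List.foldl_append_singleton_eq_map
    (fun L => pvMaxcntLoop (pvPs s L) 0)
    (PySem.List.pyRange 1 (PySem.Str.len (PySem.List.pyGetD s 0 "") + 1) 1) []
  exact h.trans (List.nil_append _)

-- ===== VERDICT (by name: the statement is the Claim_ definition above) =====
theorem findDominance_spec : Claim_equal_findDominance := by
  intro s _ _
  unfold Spec_findDominance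
  rw [pv_A_eq, pv_B_eq]
  apply List.map_congr_left
  intro L _
  rw [pv_cnt_eq_counter, pv_values_counter, pv_loop_eq (pvPs s L).length _ le_rfl 0]
  rfl
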